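-- pv_equiv track=rewrite | github.com/MGupta313/Codon-coverage | Other_scripts/final_run.py | cal_codon_cov
-- ===== SOURCE A (Python) =====
-- def cal_codon_cov(input_dict):
-- 	codon_cov_dict={}
-- 	#avg_codon_cov = {}
-- 	for key in input_dict:
-- 		sum1=0
-- 		#avg = 0
-- 		temp_list2=[]
-- 		#avg_list = []
-- 		for i in range(len(input_dict[key])):
-- 			sum1 = sum1 + int(input_dict[key][i])
-- 			if (i+1)%3 == 0:
-- 				#avg = sum1//3
-- 				temp_list2.append(sum1)
-- 				#avg_list.append(avg)
-- 				sum1=0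
-- 		codon_cov_dict[key] = temp_list2
-- 		#avg_codon_cov[key] = avg_list
-- 	return codon_cov_dict
-- ===== SOURCE B (Python) =====
-- def cal_codon_cov(input_dict):
-- 	return {key: [sum(int(v) for v in t) for t in zip(*[iter(vals)] * 3)]
-- 		for key, vals in input_dict.items()}
-- ===== Notes on version B (the rewrite author's own statement) =====
-- stated objective: idiomatic
-- what changed: B replaces A's index loop with a running accumulator and an (i+1)%3 flush by grouping each value list into consecutive triples with zip(*[iter(vals)]*3) (which drops the trailing partial group, as A does) and summing each triple, inside a dict comprehension.
import Mathlib
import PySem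

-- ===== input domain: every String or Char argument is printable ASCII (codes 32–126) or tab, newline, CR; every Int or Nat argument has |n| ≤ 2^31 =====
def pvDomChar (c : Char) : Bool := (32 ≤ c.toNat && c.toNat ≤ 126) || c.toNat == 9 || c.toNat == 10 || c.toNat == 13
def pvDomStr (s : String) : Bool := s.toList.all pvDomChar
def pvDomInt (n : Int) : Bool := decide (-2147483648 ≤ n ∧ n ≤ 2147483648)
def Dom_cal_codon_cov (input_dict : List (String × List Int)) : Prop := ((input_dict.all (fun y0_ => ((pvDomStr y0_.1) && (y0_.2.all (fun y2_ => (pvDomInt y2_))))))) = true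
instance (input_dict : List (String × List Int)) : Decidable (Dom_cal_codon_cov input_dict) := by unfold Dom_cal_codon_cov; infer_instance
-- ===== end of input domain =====

-- B replaces A's index loop + (i+1)%3 flush by grouping each value list into consecutive
-- triples and summing each triple (idiomatic; same cost).

-- ===== PORT A =====
-- Literal port of A. input_dict is a Python dict: Dict.ofList gives dict semantics
-- (duplicate keys collapse). input_dict[key] is always a hit (key iterated from the dict),
-- hence getD with an unused default; vals[i] has i always in range, hence pyGetD.
def cal_codon_cov (input_dict : List (String × List Int)) : List (String × List Int) :=
  let d := PySem.Dict.ofList input_dict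
  (d.items.foldl (fun codon_cov_dict kv =>
      let vals := d.getD kv.1 []
      let st := (PySem.List.pyRange 0 (PySem.List.len vals)).foldl
        (fun (st : Int × List Int) i =>
          let sum1 := st.1 + PySem.List.pyGetD vals i 0
          if PySem.Int.mod (i + 1) 3 == 0 then (0, st.2 ++ [sum1]) else (sum1, st.2))
        (0, [])
      codon_cov_dict.insert kv.1 st.2)
    PySem.Dict.empty).items

-- ===== PORT B =====
-- zip(*[iter(vals)]*3): consecutive triples, trailing partial group dropped; sum each.
def pvSumTriples : List Int → List Int
  | a :: b :: c :: rest => (a + b + c) :: pvSumTriples rest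
  | _ => []

def cal_codon_cov_alt (input_dict : List (String × List Int)) : List (String × List Int) :=
  let d := PySem.Dict.ofList input_dict
  (d.items.foldl (fun acc kv => acc.insert kv.1 (pvSumTriples kv.2)) PySem.Dict.empty).items

-- ===== PRECONDITION & SPEC =====
def Spec_cal_codon_cov (input_dict : List (String × List Int)) (out : List (String × List Int)) : Prop := out = cal_codon_cov_alt input_dict
instance (input_dict : List (String × List Int)) (out : List (String × List Int)) : Decidable (Spec_cal_codon_cov input_dict out) := by unfold Spec_cal_codon_cov; infer_instance

-- ===== CLAIM (what is proved, stated in full; the proofs are below) =====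
def Claim_equal_cal_codon_cov : Prop := ∀ (input_dict : List (String × List Int)), Dom_cal_codon_cov input_dict → Spec_cal_codon_cov input_dict (cal_codon_cov input_dict)

-- ===== LEMMAS AND PROOFS =====

-- A's loop body, named for the proofs (defeq to the port's inner lambda after zeta/beta).
def pvStep (st : Int × List Int) (i x : Int) : Int × List Int :=
  if PySem.Int.mod (i + 1) 3 == 0 then (0, st.2 ++ [st.1 + x]) else (st.1 + x, st.2)

theorem pv_mod_cast (n : Nat) : PySem.Int.mod ((n : Int) + 1) 3 = (((n + 1) % 3 : Nat) : Int) := by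
  rw [show ((n : Int) + 1) = ((n + 1 : Nat) : Int) by push_cast; ring]
  exact PySem.Int.mod_natCast _ _

theorem pv_flag_false {n : Nat} (h : (n + 1) % 3 ≠ 0) :
    (PySem.Int.mod ((n : Int) + 1) 3 == 0) = false := by
  rw [pv_mod_cast]
  simp only [beq_eq_false_iff_ne, ne_eq, Nat.cast_eq_zero]
  exact h

theorem pv_flag_true {n : Nat} (h : (n + 1) % 3 = 0) :
    (PySem.Int.mod ((n : Int) + 1) 3 == 0) = true := by
  rw [pv_mod_cast, h]
  simp

-- Bridge: A's fold over range(len(vals)) with vals[i] is a fold over vals paired with its index.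
theorem pv_foldl_pyRange_zipIdx {β : Type} (g : β → Int → Int → β) (d0 : Int) :
    ∀ (suf pre : List Int) (init : β),
      (PySem.List.pyRange (pre.length : Int) ((pre.length : Int) + (suf.length : Int))).foldl
        (fun acc i => g acc i (PySem.List.pyGetD (pre ++ suf) i d0)) init
      = (suf.zipIdx pre.length).foldl (fun acc xi => g acc (xi.2 : Int) xi.1) init := by
  intro suf
  induction suf with
  | nil => intro pre init; simp [PySem.List.pyRange]
  | cons x suf ih =>
    intro pre init
    rw [PySem.List.pyRange_one_cons (by push_cast [List.length_cons]; omega)]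
    simp only [List.foldl_cons, List.zipIdx_cons]
    have hget : PySem.List.pyGetD (pre ++ x :: suf) (pre.length : Int) d0 = x := by
      rw [PySem.List.pyGetD_natCast]
      simp [List.getD_eq_getElem?_getD]
    rw [hget]
    have := ih (pre ++ [x]) (g init (pre.length : Int) x)
    simp only [List.append_assoc, List.cons_append, List.nil_append, List.length_append,
      List.length_cons, List.length_nil, Nat.zero_add] at this ⊢
    rw [show ((pre.length : Int) + ((suf.length + 1 : Nat) : Int)) = ((pre.length + 1 : Nat) : Int) + (suf.length : Int) by push_cast; ring]
    rw [show ((pre.length : Int) + 1) = ((pre.length + 1 : Nat) : Int) by push_cast; ring]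
    exact this

-- A's accumulator loop computes the triple sums.
theorem pv_trip (vals : List Int) : ∀ (n : Nat) (acc : List Int), n % 3 = 0 →
    ((vals.zipIdx n).foldl (fun st xi => pvStep st (xi.2 : Int) xi.1) (0, acc)).2
      = acc ++ pvSumTriples vals := by
  match vals with
  | [] => intro n acc _; simp [pvSumTriples]
  | [a] =>
    intro n acc h
    simp only [List.zipIdx_cons, List.zipIdx_nil, List.foldl_cons, List.foldl_nil, pvStep,
      pv_flag_false (n := n) (by omega), Bool.false_eq_true, if_false]
    rw [show pvSumTriples [a] = [] from rfl, List.append_nil]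
  | [a, b] =>
    intro n acc h
    simp only [List.zipIdx_cons, List.zipIdx_nil, List.foldl_cons, List.foldl_nil, pvStep,
      pv_flag_false (n := n) (by omega), pv_flag_false (n := n + 1) (by omega),
      Bool.false_eq_true, if_false]
    rw [show pvSumTriples [a, b] = [] from rfl, List.append_nil]
  | a :: b :: c :: rest =>
    intro n acc h
    simp only [List.zipIdx_cons, List.foldl_cons, pvStep,
      pv_flag_false (n := n) (by omega), pv_flag_false (n := n + 1) (by omega),
      pv_flag_true (n := n + 2) (by omega), Bool.false_eq_true, if_false, if_true]
    have := pv_trip rest (n + 3) (acc ++ [0 + a + b + c]) (by omega)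
    simp only [pvStep] at this
    rw [show n + 2 + 1 = n + 3 from rfl, this]
    simp [pvSumTriples]

-- Inner loops agree on each value list.
theorem pv_inner_eq (vals : List Int) :
    ((PySem.List.pyRange 0 (PySem.List.len vals)).foldl
      (fun st i => pvStep st i (PySem.List.pyGetD vals i 0)) (0, [])).2 = pvSumTriples vals := by
  have hb := pv_foldl_pyRange_zipIdx pvStep 0 vals [] ((0 : Int), ([] : List Int))
  simp only [List.length_nil, Nat.cast_zero, zero_add, List.nil_append] at hb
  have ht := pv_trip vals 0 [] rfl
  simp only [List.nil_append] at ht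
  rw [show PySem.List.len vals = (vals.length : Int) from rfl, hb]
  exact ht

theorem pv_nodup_fst (input_dict : List (String × List Int)) :
    ((PySem.Dict.ofList input_dict).items.map (fun kv => kv.1)).Nodup :=
  PySem.Dict.nodup_keys_ofList input_dict

theorem cal_codon_cov_eq_map (input_dict : List (String × List Int)) :
    cal_codon_cov input_dict
      = (PySem.Dict.ofList input_dict).items.map (fun kv => (kv.1, pvSumTriples kv.2)) := by
  show ((PySem.Dict.ofList input_dict).items.foldl (fun codon_cov_dict kv =>
      codon_cov_dict.insert kv.1
        ((PySem.List.pyRange 0 (PySem.List.len ((PySem.Dict.ofList input_dict).getD kv.1 []))).foldl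
          (fun st i => pvStep st i
            (PySem.List.pyGetD ((PySem.Dict.ofList input_dict).getD kv.1 []) i 0)) (0, [])).2)
      PySem.Dict.empty).items = _
  have h := PySem.Dict.items_foldl_insert_fresh (PySem.Dict.ofList input_dict).items
    (fun kv => kv.1)
    (fun kv => ((PySem.List.pyRange 0 (PySem.List.len ((PySem.Dict.ofList input_dict).getD kv.1 []))).foldl
      (fun st i => pvStep st i
        (PySem.List.pyGetD ((PySem.Dict.ofList input_dict).getD kv.1 []) i 0)) (0, [])).2)
    PySem.Dict.empty (fun a _ => PySem.Dict.contains_empty _) (pv_nodup_fst input_dict)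
  simp only [] at h
  rw [h, show (PySem.Dict.empty : PySem.Dict String (List Int)).items = [] from rfl, List.nil_append]
  apply List.map_congr_left
  intro kv hkv
  have hget : (PySem.Dict.ofList input_dict).getD kv.1 [] = kv.2 :=
    PySem.Dict.getD_of_mem_items _ (by simpa using hkv) (PySem.Dict.nodup_keys_ofList _) _
  rw [hget, pv_inner_eq]

theorem cal_codon_cov_alt_eq_map (input_dict : List (String × List Int)) :
    cal_codon_cov_alt input_dict
      = (PySem.Dict.ofList input_dict).items.map (fun kv => (kv.1, pvSumTriples kv.2)) := by
  show ((PySem.Dict.ofList input_dict).items.foldl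
      (fun acc kv => acc.insert kv.1 (pvSumTriples kv.2)) PySem.Dict.empty).items = _
  have h := PySem.Dict.items_foldl_insert_fresh (PySem.Dict.ofList input_dict).items
    (fun kv => kv.1) (fun kv => pvSumTriples kv.2)
    PySem.Dict.empty (fun a _ => PySem.Dict.contains_empty _) (pv_nodup_fst input_dict)
  simp only [] at h
  rw [h, show (PySem.Dict.empty : PySem.Dict String (List Int)).items = [] from rfl, List.nil_append]

-- ===== VERDICT (by name: the statement is the Claim_ definition above) =====
theorem cal_codon_cov_spec : Claim_equal_cal_codon_cov := by
  intro input_dict _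
  unfold Spec_cal_codon_cov
  rw [cal_codon_cov_eq_map, cal_codon_cov_alt_eq_map]
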